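-- pv_equiv track=rewrite | github.com/import1234/AlgorithmPS | 백준/Gold/30805. 사전 순 최대 공통 부분 수열/사전 순 최대 공통 부분 수열.py | f
-- ===== SOURCE A (Python) =====
-- def f(a,b):
--     if len(a)>len(b):a,b=b,a
--     sa=sorted(a,reverse=1)
--     sb=set(b)
--     t=None
--     for x in sa:
--         if x in sb:
--             t=x
--             break
--     if t:
--         return [t]+f(a[a.index(t)+1:],b[b.index(t)+1:])
--     else:
--         return []
-- ===== SOURCE B (Python) =====
-- def f(a, b):
--     pos_a = {}
--     for idx in range(len(a)):
--         pos_a.setdefault(a[idx], []).append(idx)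
--     pos_b = {}
--     for idx in range(len(b)):
--         pos_b.setdefault(b[idx], []).append(idx)
--     out = []
--     i = j = 0
--     for v in sorted(set(pos_a) & set(pos_b), reverse=True):
--         pa = pos_a[v]
--         pb = pos_b[v]
--         ka = 0
--         kb = 0
--         while ka < len(pa) and pa[ka] < i:
--             ka += 1
--         while kb < len(pb) and pb[kb] < j:
--             kb += 1
--         while ka < len(pa) and kb < len(pb):
--             out.append(v)
--             i = pa[ka] + 1
--             j = pb[kb] + 1
--             ka += 1
--             kb += 1
--     return out
-- ===== Notes on version B (the rewrite author's own statement) =====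
-- stated objective: faster
-- what changed: A re-sorts the remaining list and rebuilds a set at every recursive step (one step per output element); B precomputes value->position lists once, sorts the distinct common values once, and emits the whole answer in a single descending-value sweep with two monotone index pointers.
-- intended difference: When 0 is a common value that the greedy reaches, A's 'if t:' treats the found value 0 like None and truncates, returning the subsequence without the 0 and anything after it (e.g. f([0],[0]) = []); B returns the intended lexicographically maximal common subsequence, keeping the 0 (f([0],[0]) = [0]). — e.g. on f([0], [0]): A returns [], B returns [0]
import Mathlib
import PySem

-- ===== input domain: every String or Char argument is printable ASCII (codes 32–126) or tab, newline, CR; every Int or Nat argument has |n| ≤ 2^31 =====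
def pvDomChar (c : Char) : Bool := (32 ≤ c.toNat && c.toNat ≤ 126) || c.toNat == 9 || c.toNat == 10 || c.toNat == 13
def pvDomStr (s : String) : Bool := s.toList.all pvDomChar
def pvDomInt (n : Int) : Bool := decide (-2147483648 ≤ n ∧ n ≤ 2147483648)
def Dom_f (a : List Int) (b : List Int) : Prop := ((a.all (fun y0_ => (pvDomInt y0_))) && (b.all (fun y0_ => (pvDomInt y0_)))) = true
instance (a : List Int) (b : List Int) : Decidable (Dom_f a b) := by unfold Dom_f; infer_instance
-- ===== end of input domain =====

-- B replaces A's quadratic re-sort-per-step recursion by precomputed value->position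
-- lists and a descending-value two-pointer greedy (objective: faster).


-- ===== PORT A =====
-- 'for x in sa: if x in sb: t=x; break'  (t=None when the loop finds nothing)
def findBreak (sa : List Int) (sb : PySem.Set Int) : Option Int :=
  match sa with
  | [] => none
  | x :: xs => if PySem.Set.contains sb x then some x else findBreak xs sb

def f (a : List Int) (b : List Int) : List Int :=
  match hab : (if a.length > b.length then (b, a) else (a, b)) with
  | (a1, b1) =>
    let sa := PySem.List.sorted a1 (fun x => x) true
    let sb := PySem.Set.ofList b1
    match findBreak sa sb with
    | none => []            -- 'if t:' with t = None
    | some t =>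
      if t = 0 then []      -- 'if t:' with t == 0
      else
        match ha : PySem.List.index? a1 t, hb : PySem.List.index? b1 t with
        | some ia, some ib =>
            t :: f (PySem.List.slice a1 (some ((ia + 1 : Nat) : Int)) none)
                   (PySem.List.slice b1 (some ((ib + 1 : Nat) : Int)) none)
        | _, _ => []        -- unreachable: t is a common element, both indices exist
termination_by a.length + b.length
decreasing_by
  all_goals
    rcases (PySem.List.index?_eq_some_iff _ _ _).1 ha with ⟨pre, suf, hpre, hlen, -⟩
    rcases (PySem.List.index?_eq_some_iff _ _ _).1 hb with ⟨pre', suf', hpre', hlen', -⟩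
    have h1 : ia < a1.length := by rw [hpre, ← hlen]; simp
    have h2 : ib < b1.length := by rw [hpre', ← hlen']; simp
    have hs : a1.length + b1.length = a.length + b.length := by
      by_cases hc : a.length > b.length
      · rw [dif_pos hc] at hab; cases hab; omega
      · rw [dif_neg hc] at hab; cases hab; omega
    simp only [PySem.List.slice_from_natCast, List.length_drop]
    omega

-- ===== PORT B =====
-- 'pos = {}; for idx in range(len(xs)): pos.setdefault(xs[idx], []).append(idx)'
def buildPos (xs : List Int) : PySem.Dict Int (List Int) :=
  (PySem.List.pyRange 0 (xs.length : Int) 1).foldl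
    (fun d idx => d.modify (PySem.List.pyGetD xs idx 0) [] (fun l => l ++ [idx]))
    PySem.Dict.empty

-- 'while ka < len(pa) and pa[ka] < x: ka += 1'
def skipLt (pa : List Int) (x : Int) (ka : Nat) : Nat :=
  if h : ka < pa.length then
    if pa[ka] < x then skipLt pa x (ka + 1) else ka
  else ka
termination_by pa.length - ka

-- 'while ka < len(pa) and kb < len(pb): out.append(v); i=pa[ka]+1; j=pb[kb]+1; ka+=1; kb+=1'
def takeRun (v : Int) (pa pb : List Int) (ka kb : Nat) (i j : Int) (out : List Int) :
    List Int × Int × Int :=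
  if h : ka < pa.length ∧ kb < pb.length then
    takeRun v pa pb (ka + 1) (kb + 1) (pa[ka] + 1) (pb[kb] + 1) (out ++ [v])
  else (out, i, j)
termination_by pa.length - ka

-- 'for v in sorted(set(pos_a) & set(pos_b), reverse=True): …'
def mainLoop (posA posB : PySem.Dict Int (List Int)) (vs : List Int) (i j : Int)
    (out : List Int) : List Int :=
  match vs with
  | [] => out
  | v :: rest =>
    let pa := posA.getD v []
    let pb := posB.getD v []
    let ka := skipLt pa i 0
    let kb := skipLt pb j 0
    let r := takeRun v pa pb ka kb i j out
    mainLoop posA posB rest r.2.1 r.2.2 r.1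

def f_alt (a : List Int) (b : List Int) : List Int :=
  let posA := buildPos a
  let posB := buildPos b
  let vs := PySem.List.sorted
      (PySem.Set.inter (PySem.Set.ofList posA.keys) posB.keys) (fun x => x) true
  mainLoop posA posB vs 0 0 []

-- ===== PRECONDITION & SPEC =====
-- When 0 is a common value that the greedy reaches, A's 'if t:' (falsy 0) truncates the
-- answer, returning [] instead of continuing; B returns the intended lexicographically
-- maximal common subsequence, which keeps the 0 and what follows.
def D_f (a : List Int) (b : List Int) : Prop := 0 ∈ a ∧ 0 ∈ b
instance (a : List Int) (b : List Int) : Decidable (D_f a b) := by unfold D_f; infer_instance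

def Spec_f (a : List Int) (b : List Int) (out : List Int) : Prop := ¬ D_f a b → out = f_alt a b
instance (a : List Int) (b : List Int) (out : List Int) : Decidable (Spec_f a b out) := by
  unfold Spec_f; infer_instance

def pvDiffWitness_f : List Int × List Int := ([0], [0])
def pvDiffWitnessOut_f : (List Int) × (List Int) := ([], [0])

-- ===== CLAIM =====
def Claim_unchanged_f : Prop := ∀ (a : List Int) (b : List Int), Dom_f a b → Spec_f a b (f a b)
def Claim_changed_f : Prop :=
  Dom_f (pvDiffWitness_f.1) (pvDiffWitness_f.2) ∧ D_f (pvDiffWitness_f.1) (pvDiffWitness_f.2) ∧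
  f (pvDiffWitness_f.1) (pvDiffWitness_f.2) = pvDiffWitnessOut_f.1 ∧
  f_alt (pvDiffWitness_f.1) (pvDiffWitness_f.2) = pvDiffWitnessOut_f.2 ∧
  pvDiffWitnessOut_f.1 ≠ pvDiffWitnessOut_f.2

-- ===== LEMMAS AND PROOFS =====

-- ---- reference greedy G: repeatedly take the largest common value, cut past its first occurrences ----
def cutL (xs : List Int) (t : Int) : List Int :=
  xs.drop (((PySem.List.index? xs t).getD xs.length) + 1)

theorem index?_split {xs : List Int} {t : Int} (h : t ∈ xs) :
    ∃ k pre suf, PySem.List.index? xs t = some k ∧ xs = pre ++ t :: suf ∧ pre.length = k ∧ t ∉ pre := by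
  have hs : (PySem.List.index? xs t).isSome := (PySem.List.index?_isSome_iff _ _).2 h
  rcases Option.isSome_iff_exists.1 hs with ⟨k, hk⟩
  rcases (PySem.List.index?_eq_some_iff _ _ _).1 hk with ⟨pre, suf, h1, h2, h3⟩
  exact ⟨k, pre, suf, hk, h1, h2, h3⟩

theorem cutL_eq_suf {xs : List Int} {t : Int} {k : Nat} {pre suf : List Int}
    (hk : PySem.List.index? xs t = some k) (hx : xs = pre ++ t :: suf) (hl : pre.length = k) :
    cutL xs t = suf := by
  subst hx; unfold cutL
  rw [hk]
  simp [← hl, List.drop_append]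

theorem cutL_length_lt {xs : List Int} {t : Int} (h : t ∈ xs) : (cutL xs t).length < xs.length := by
  rcases index?_split h with ⟨k, pre, suf, hk, hx, hl, -⟩
  rw [cutL_eq_suf hk hx hl, hx]
  simp; omega

theorem cutL_subset {xs : List Int} {t : Int} : cutL xs t ⊆ xs := by
  unfold cutL; exact fun x hx => List.mem_of_mem_drop hx

def G (x y : List Int) : List Int :=
  match h : (x.filter (fun u => decide (u ∈ y))).max? with
  | none => []
  | some t => t :: G (cutL x t) (cutL y t)
termination_by x.length + y.length
decreasing_by
  have ht : t ∈ x.filter (fun u => decide (u ∈ y)) := List.max?_mem h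
  simp only [List.mem_filter, decide_eq_true_eq] at ht
  have h1 := cutL_length_lt ht.1
  have h2 := cutL_length_lt ht.2
  omega

theorem G_of_none {x y : List Int} (h : (x.filter (fun u => decide (u ∈ y))).max? = none) :
    G x y = [] := by
  rw [G]
  split
  · rfl
  · rename_i t heq; rw [h] at heq; cases heq

theorem G_of_some {x y : List Int} {t : Int}
    (h : (x.filter (fun u => decide (u ∈ y))).max? = some t) :
    G x y = t :: G (cutL x t) (cutL y t) := by
  rw [G]
  split
  · rename_i heq; rw [h] at heq; cases heq
  · rename_i t' heq; rw [h] at heq; cases heq; rfl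

theorem mc_eq_some_iff {x y : List Int} {t : Int} :
    (x.filter (fun u => decide (u ∈ y))).max? = some t ↔
      (t ∈ x ∧ t ∈ y) ∧ ∀ c, c ∈ x → c ∈ y → c ≤ t := by
  rw [List.max?_eq_some_iff]
  simp [List.mem_filter]

theorem mc_eq_none_iff {x y : List Int} :
    (x.filter (fun u => decide (u ∈ y))).max? = none ↔ ∀ c, c ∈ x → c ∉ y := by
  rw [List.max?_eq_none_iff, List.filter_eq_nil_iff]
  simp

theorem mc_comm (x y : List Int) :
    (x.filter (fun u => decide (u ∈ y))).max? = (y.filter (fun u => decide (u ∈ x))).max? := by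
  cases h : (y.filter (fun u => decide (u ∈ x))).max? with
  | none => rw [mc_eq_none_iff] at h ⊢; exact fun c hx hy => h c hy hx
  | some t =>
    rw [mc_eq_some_iff] at h ⊢
    exact ⟨⟨h.1.2, h.1.1⟩, fun c hx hy => h.2 c hy hx⟩

theorem G_comm (x y : List Int) : G x y = G y x := by
  generalize hn : x.length + y.length = n
  induction n using Nat.strong_induction_on generalizing x y with
  | _ n ih =>
  cases h : (x.filter (fun u => decide (u ∈ y))).max? with
  | none =>
    rw [G_of_none h, G_of_none (by rw [mc_comm y x]; exact h)]
  | some t =>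
    have ht := (mc_eq_some_iff.1 h).1
    have h1 := cutL_length_lt ht.1
    have h2 := cutL_length_lt ht.2
    rw [G_of_some h, G_of_some (x := y) (y := x) (t := t) (by rw [mc_comm y x]; exact h)]
    rw [ih ((cutL x t).length + (cutL y t).length) (by omega) _ _ rfl]

-- ---- A-side: findBreak on the descending sort computes the maximal common value ----
theorem findBreak_eq (l ys : List Int) (hp : l.Pairwise (fun p q => q ≤ p)) :
    findBreak l (PySem.Set.ofList ys) = (l.filter (fun u => decide (u ∈ ys))).max? := by
  induction l with
  | nil => rfl
  | cons x xs ih =>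
    rw [List.pairwise_cons] at hp
    rw [findBreak, List.filter_cons]
    by_cases hx : x ∈ ys
    · rw [if_pos ((PySem.Set.contains_iff _ _).2 ((PySem.Set.mem_ofList _ _).2 hx)),
        if_pos (by simpa)]
      symm
      rw [List.max?_eq_some_iff]
      refine ⟨List.mem_cons_self, ?_⟩
      intro c hc
      rcases List.mem_cons.1 hc with h | h
      · exact le_of_eq h
      · exact hp.1 c (List.mem_filter.1 h).1
    · rw [if_neg (by
        intro hc
        exact hx ((PySem.Set.mem_ofList _ _).1 ((PySem.Set.contains_iff _ _).1 hc))),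
        if_neg (by simpa)]
      exact ih hp.2

theorem max?_eq_of_perm {l l' : List Int} (h : l.Perm l') : l.max? = l'.max? := by
  cases h2 : l'.max? with
  | none =>
    rw [List.max?_eq_none_iff] at h2 ⊢
    subst h2; exact h.eq_nil
  | some t =>
    rw [List.max?_eq_some_iff] at h2 ⊢
    exact ⟨h.mem_iff.2 h2.1, fun b hb => h2.2 b (h.mem_iff.1 hb)⟩

theorem f_eq_G (x y : List Int) (h0 : ¬ (0 ∈ x ∧ 0 ∈ y)) : f x y = G x y := by
  generalize hn : x.length + y.length = n
  induction n using Nat.strong_induction_on generalizing x y with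
  | _ n ih =>
  rw [f]
  split
  rename_i a1 b1 hab
  have hkey : G x y = G a1 b1 ∧ ¬ (0 ∈ a1 ∧ 0 ∈ b1) ∧ a1.length + b1.length = n := by
    by_cases hc : x.length > y.length
    · rw [if_pos hc] at hab
      cases hab
      exact ⟨G_comm x y, fun h => h0 ⟨h.2, h.1⟩, by omega⟩
    · rw [if_neg hc] at hab
      cases hab
      exact ⟨rfl, h0, hn⟩
  obtain ⟨hG, h0', hlen⟩ := hkey
  have hfb : findBreak (PySem.List.sorted a1 (fun u => u) true) (PySem.Set.ofList b1)
      = (a1.filter (fun u => decide (u ∈ b1))).max? := by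
    rw [findBreak_eq _ _ (PySem.List.sorted_pairwise_rev a1 (fun u => u))]
    exact max?_eq_of_perm ((PySem.List.sorted_perm a1 (fun u => u) true).filter _)
  dsimp only
  split
  · rename_i heq
    rw [hfb] at heq
    rw [hG, G_of_none heq]
  · rename_i t heq
    rw [hfb] at heq
    have htm := mc_eq_some_iff.1 heq
    have ht0 : ¬ t = 0 := fun ht => h0' ⟨ht ▸ htm.1.1, ht ▸ htm.1.2⟩
    rw [if_neg ht0]
    split
    · rename_i ia ib ha hb
      have hsl1 : PySem.List.slice a1 (some ((ia + 1 : Nat) : Int)) none = cutL a1 t := by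
        rw [PySem.List.slice_from_natCast]; unfold cutL; rw [ha]; simp
      have hsl2 : PySem.List.slice b1 (some ((ib + 1 : Nat) : Int)) none = cutL b1 t := by
        rw [PySem.List.slice_from_natCast]; unfold cutL; rw [hb]; simp
      rw [hsl1, hsl2]
      have hc1 := cutL_length_lt htm.1.1
      have hc2 := cutL_length_lt htm.1.2
      rw [ih ((cutL a1 t).length + (cutL b1 t).length) (by omega) _ _
        (fun hc => h0' ⟨cutL_subset hc.1, cutL_subset hc.2⟩) rfl]
      rw [hG, G_of_some heq]
    · rename_i hnone
      exfalso
      rcases index?_split htm.1.1 with ⟨ka, -, -, hka, -, -, -⟩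
      rcases index?_split htm.1.2 with ⟨kb, -, -, hkb, -, -, -⟩
      exact hnone ka kb hka hkb

-- ---- B-side: occurrence-position lists ----
def occ (xs : List Int) (v : Int) : List Int :=
  ((List.range xs.length).filter (fun k => decide (xs.getD k 0 = v))).map (fun k => Int.ofNat k)

theorem occ_mem_iff {xs : List Int} {v : Int} (k : Nat) :
    ((k : Int) ∈ occ xs v) ↔ (k < xs.length ∧ xs.getD k 0 = v) := by
  unfold occ
  simp [List.mem_filter, List.mem_range]

theorem occ_nonneg {xs : List Int} {v : Int} {p : Int} (h : p ∈ occ xs v) : 0 ≤ p := by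
  unfold occ at h
  rcases List.mem_map.1 h with ⟨k, -, hk⟩
  exact hk ▸ Int.natCast_nonneg k

theorem occ_pairwise (xs : List Int) (v : Int) : (occ xs v).Pairwise (· < ·) := by
  unfold occ
  rw [List.pairwise_map]
  refine ((List.pairwise_lt_range).filter _).imp ?_
  intro a b h
  simpa using (Int.ofNat_lt.2 h)

theorem buildPos_getD (xs : List Int) (v : Int) : (buildPos xs).getD v [] = occ xs v := by
  unfold buildPos
  rw [PySem.List.pyRange_zero_natCast]
  rw [show (List.foldl
      (fun d idx => d.modify (PySem.List.pyGetD xs idx 0) [] (fun l => l ++ [idx]))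
      PySem.Dict.empty (List.map (fun k : Nat => (k : Int)) (List.range xs.length))) =
    (List.foldl (fun d p => d.modify p.1 [] (fun l => l ++ [p.2])) PySem.Dict.empty
      (List.map (fun k : Nat => (PySem.List.pyGetD xs (k : Int) 0, (k : Int))) (List.range xs.length)))
    from by rw [List.foldl_map, List.foldl_map]]
  rw [PySem.Dict.getD_foldl_modify_append]
  rw [List.filter_map]
  unfold occ
  simp only [Function.comp_def, PySem.List.pyGetD_natCast, PySem.Dict.getD_empty,
    List.nil_append, List.map_map]
  have hf : (List.filter (fun x => xs.getD x 0 == v) (List.range xs.length)) =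
      (List.filter (fun k => decide (xs.getD k 0 = v)) (List.range xs.length)) :=
    List.filter_congr (fun k _ => by rw [Bool.eq_iff_iff]; simp)
  rw [hf]
  rfl

theorem buildPos_keys (xs : List Int) : (buildPos xs).keys = PySem.Set.ofList xs := by
  unfold buildPos
  rw [PySem.Dict.keys_foldl_modify_key (f := fun _ idx l => l ++ [idx])]
  have hm : (PySem.List.pyRange 0 (xs.length : Int) 1).map (fun j => PySem.List.pyGetD xs j 0) = xs := by
    simpa using PySem.List.map_pyGetD_pyRange_zero xs 0
  rw [hm, PySem.Dict.keys_empty, PySem.Set.update_nil_left]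

-- ---- B-side: the skip loop lands on the first remaining occurrence ----
def SkipPt (pa : List Int) (x : Int) (k : Nat) : Prop :=
  k ≤ pa.length ∧ (∀ m (hm : m < pa.length), m < k → pa[m] < x) ∧ (∀ hm : k < pa.length, x ≤ pa[k])

theorem skipLt_spec (pa : List Int) (x : Int) (ka : Nat) (hle : ka ≤ pa.length)
    (hpre : ∀ m (hm : m < pa.length), m < ka → pa[m] < x) : SkipPt pa x (skipLt pa x ka) := by
  induction ka using skipLt.induct pa x with
  | case1 ka h hlt ih =>
    rw [skipLt, dif_pos h, if_pos hlt]
    exact ih h (by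
      intro m hm hmk
      rcases Nat.lt_or_ge m ka with h' | h'
      · exact hpre m hm h'
      · have : m = ka := by omega
        subst this; exact hlt)
  | case2 ka h hlt =>
    rw [skipLt, dif_pos h, if_neg hlt]
    exact ⟨Nat.le_of_lt h, hpre, fun _ => le_of_not_gt hlt⟩
  | case3 ka h =>
    rw [skipLt, dif_neg h]
    exact ⟨hle, hpre, fun hm => absurd hm h⟩

theorem occ_mem_elim {a : List Int} {v p : Int} (h : p ∈ occ a v) :
    ∃ kp : Nat, p = (kp : Int) ∧ kp < a.length ∧ a.getD kp 0 = v := by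
  unfold occ at h
  rcases List.mem_map.1 h with ⟨kp, hin, hep⟩
  rcases List.mem_filter.1 hin with ⟨hr, hv⟩
  exact ⟨kp, by exact_mod_cast hep.symm, List.mem_range.1 hr, of_decide_eq_true hv⟩

theorem occ_mem_intro {a : List Int} {v : Int} {q : Nat} (hq : q < a.length)
    (hv : a[q]? = some v) : ((q : Nat) : Int) ∈ occ a v := by
  rw [occ_mem_iff]
  refine ⟨hq, ?_⟩
  rw [List.getD_eq_getElem?_getD, hv, Option.getD_some]

-- the first occurrence of v at or after position i, as the drop-side index? value
theorem drop_occurrence {a : List Int} {v : Int} {n k : Nat}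
    (hk : PySem.List.index? (a.drop n) v = some k) :
    n + k < a.length ∧ a[n + k]? = some v ∧ ∀ r, n ≤ r → r < n + k → a[r]? ≠ some v := by
  rcases PySem.List.getElem_of_index?_eq_some hk with ⟨hk_len, hk_val, hk_min⟩
  have hdlen : (a.drop n).length = a.length - n := List.length_drop
  refine ⟨by omega, ?_, ?_⟩
  · rw [← List.getElem?_drop, List.getElem?_eq_getElem hk_len, hk_val]
  · intro r hr1 hr2 hrv
    have hrlen : r < a.length := by omega
    have : (a.drop n)[r - n]? = some v := by
      rw [List.getElem?_drop, show n + (r - n) = r from by omega]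
      exact hrv
    have hlt : r - n < (a.drop n).length := by omega
    rw [List.getElem?_eq_getElem hlt] at this
    exact (hk_min (r - n) (by omega)) (Option.some_injective _ this)

-- first remaining occurrence: if the skip point is interior, it is the first occurrence ≥ i
theorem occ_first {a : List Int} {v i : Int} {ka : Nat} (hi : 0 ≤ i)
    (hs : SkipPt (occ a v) i ka) (hlt : ka < (occ a v).length) :
    v ∈ a.drop i.toNat ∧
      (occ a v)[ka] = ((i.toNat + ((PySem.List.index? (a.drop i.toNat) v).getD 0) : Nat) : Int) := by
  obtain ⟨hka_le, hbefore, hafter⟩ := hs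
  have hmem : (occ a v)[ka] ∈ occ a v := List.getElem_mem hlt
  rcases occ_mem_elim hmem with ⟨kp, hkp, hkp_len, hkp_val⟩
  have hikp : i ≤ (kp : Int) := hkp ▸ hafter hlt
  have hikp' : i.toNat ≤ kp := by omega
  have hdlen : (a.drop i.toNat).length = a.length - i.toNat := List.length_drop
  have hget : (a.drop i.toNat)[kp - i.toNat]? = some v := by
    rw [List.getElem?_drop, show i.toNat + (kp - i.toNat) = kp from by omega,
      List.getElem?_eq_getElem hkp_len]
    rw [List.getD_eq_getElem a 0 hkp_len] at hkp_val
    rw [hkp_val]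
  have hvmem : v ∈ a.drop i.toNat := List.mem_of_getElem? hget
  refine ⟨hvmem, ?_⟩
  rcases index?_split hvmem with ⟨k, pre, suf, hk, -, -, -⟩
  obtain ⟨hq_len, hq_val, hq_min⟩ := drop_occurrence hk
  rw [hk, Option.getD_some]
  have hq_mem : ((i.toNat + k : Nat) : Int) ∈ occ a v := occ_mem_intro hq_len hq_val
  rcases List.mem_iff_getElem.1 hq_mem with ⟨m, hm, hqm⟩
  have hka_le_m : ka ≤ m := by
    by_contra hcon
    have := hbefore m hm (by omega)
    omega
  have hle1 : (occ a v)[ka] ≤ ((i.toNat + k : Nat) : Int) := by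
    rcases Nat.eq_or_lt_of_le hka_le_m with he | hlt' 
    · subst he; rw [hqm]
    · have hpw := (List.pairwise_iff_getElem).1 (occ_pairwise a v) ka m hlt hm hlt'
      omega
  have hle2 : ((i.toNat + k : Nat) : Int) ≤ (occ a v)[ka] := by
    rw [hkp]
    have hkkp : ¬ kp < i.toNat + k := by
      intro hcon
      exact hq_min kp hikp' hcon (by
        rw [List.getElem?_eq_getElem hkp_len]
        rw [List.getD_eq_getElem a 0 hkp_len] at hkp_val
        rw [hkp_val])
    omega
  omega

theorem occ_exhausted {a : List Int} {v i : Int} {ka : Nat} (hi : 0 ≤ i)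
    (hs : SkipPt (occ a v) i ka) (hge : ¬ ka < (occ a v).length) :
    v ∉ a.drop i.toNat := by
  obtain ⟨hka_le, hbefore, -⟩ := hs
  intro hvmem
  rcases index?_split hvmem with ⟨k, pre, suf, hk, -, -, -⟩
  obtain ⟨hq_len, hq_val, -⟩ := drop_occurrence hk
  have hq_mem : ((i.toNat + k : Nat) : Int) ∈ occ a v := occ_mem_intro hq_len hq_val
  rcases List.mem_iff_getElem.1 hq_mem with ⟨m, hm, hqm⟩
  have := hbefore m hm (by omega)
  omega

-- ---- the mid-level descending-value greedy ----
def M (vs : List Int) (x y : List Int) : List Int :=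
  match vs with
  | [] => []
  | v :: rest =>
    if v ∈ x ∧ v ∈ y then v :: M (v :: rest) (cutL x v) (cutL y v) else M rest x y
termination_by (vs.length, x.length + y.length)
decreasing_by
  · right
    rename_i h
    have h1 := cutL_length_lt h.1
    have h2 := cutL_length_lt h.2
    omega
  · left; simp

theorem M_eq_G (vs x y : List Int) (hp : vs.Pairwise (· > ·))
    (hc : ∀ c, c ∈ x → c ∈ y → c ∈ vs) : M vs x y = G x y := by
  induction vs, x, y using M.induct with
  | case1 x y =>
    rw [M, G_of_none (mc_eq_none_iff.2 (fun c hx hy => by cases hc c hx hy))]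
  | case2 x y v rest h ih =>
    rw [List.pairwise_cons] at hp
    rw [M, if_pos h]
    have hmc : (x.filter (fun u => decide (u ∈ y))).max? = some v := by
      rw [mc_eq_some_iff]
      refine ⟨⟨h.1, h.2⟩, fun c hcx hcy => ?_⟩
      rcases List.mem_cons.1 (hc c hcx hcy) with hcv | hcr
      · exact le_of_eq hcv
      · exact le_of_lt (hp.1 c hcr)
    rw [G_of_some hmc]
    rw [ih (List.pairwise_cons.2 hp)
      (fun c hcx hcy => hc c (cutL_subset hcx) (cutL_subset hcy))]
  | case3 x y v rest h ih =>
    rw [List.pairwise_cons] at hp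
    rw [M, if_neg h]
    exact ih hp.2 (fun c hcx hcy => by
      rcases List.mem_cons.1 (hc c hcx hcy) with hcv | hcr
      · exact absurd ⟨hcv ▸ hcx, hcv ▸ hcy⟩ h
      · exact hcr)

theorem takeRun_spec (N : Nat) (a b : List Int) (v i j : Int) (ka kb : Nat) (out : List Int)
    (hN : (occ a v).length - ka ≤ N)
    (hsa : SkipPt (occ a v) i ka) (hsb : SkipPt (occ b v) j kb)
    (hi : 0 ≤ i) (hj : 0 ≤ j) :
    ∃ run i' j', takeRun v (occ a v) (occ b v) ka kb i j out = (out ++ run, i', j') ∧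
      0 ≤ i' ∧ 0 ≤ j' ∧
      ∀ rest, M (v :: rest) (a.drop i.toNat) (b.drop j.toNat) =
        run ++ M rest (a.drop i'.toNat) (b.drop j'.toNat) := by
  induction N generalizing ka kb i j out with
  | zero =>
    have hnlt : ¬ (ka < (occ a v).length ∧ kb < (occ b v).length) := by
      rintro ⟨h1, -⟩; omega
    refine ⟨[], i, j, ?_, hi, hj, ?_⟩
    · rw [takeRun, dif_neg hnlt]; simp
    · intro rest
      rw [M, if_neg (fun hc => (occ_exhausted hi hsa (by omega)) hc.1)]
      simp
  | succ N ih =>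
    by_cases h : ka < (occ a v).length ∧ kb < (occ b v).length
    · obtain ⟨hva, heqa⟩ := occ_first hi hsa h.1
      obtain ⟨hvb, heqb⟩ := occ_first hj hsb h.2
      rcases index?_split hva with ⟨kA, preA, sufA, hkA, -, -, -⟩
      rcases index?_split hvb with ⟨kB, preB, sufB, hkB, -, -, -⟩
      rw [hkA, Option.getD_some] at heqa
      rw [hkB, Option.getD_some] at heqb
      have hnn_a : (0:Int) ≤ (occ a v)[ka]'h.1 := occ_nonneg (List.getElem_mem h.1)
      have hnn_b : (0:Int) ≤ (occ b v)[kb]'h.2 := occ_nonneg (List.getElem_mem h.2)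
      have hsa' : SkipPt (occ a v) ((occ a v)[ka]'h.1 + 1) (ka + 1) := by
        refine ⟨h.1, fun m hm hmk => ?_, fun hm => ?_⟩
        · rcases Nat.lt_or_ge m ka with h' | h'
          · have h1 := hsa.2.1 m hm h'
            have h2 := hsa.2.2 h.1
            omega
          · have : m = ka := by omega
            subst this; omega
        · have hpw := (List.pairwise_iff_getElem).1 (occ_pairwise a v) ka (ka + 1) h.1 hm
            (Nat.lt_succ_self ka)
          omega
      have hsb' : SkipPt (occ b v) ((occ b v)[kb]'h.2 + 1) (kb + 1) := by
        refine ⟨h.2, fun m hm hmk => ?_, fun hm => ?_⟩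
        · rcases Nat.lt_or_ge m kb with h' | h'
          · have h1 := hsb.2.1 m hm h'
            have h2 := hsb.2.2 h.2
            omega
          · have : m = kb := by omega
            subst this; omega
        · have hpw := (List.pairwise_iff_getElem).1 (occ_pairwise b v) kb (kb + 1) h.2 hm
            (Nat.lt_succ_self kb)
          omega
      obtain ⟨run', i', j', heq, hi', hj', hM⟩ :=
        ih ((occ a v)[ka]'h.1 + 1) ((occ b v)[kb]'h.2 + 1) (ka + 1) (kb + 1) (out ++ [v])
          (by omega) hsa' hsb' (by omega) (by omega)
      refine ⟨v :: run', i', j', ?_, hi', hj', ?_⟩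
      · rw [takeRun, dif_pos h, heq]
        simp
      · intro rest
        rw [M, if_pos ⟨hva, hvb⟩]
        have hcut_a : cutL (a.drop i.toNat) v = a.drop ((occ a v)[ka]'h.1 + 1).toNat := by
          unfold cutL
          rw [hkA, Option.getD_some, List.drop_drop]
          congr 1
          omega
        have hcut_b : cutL (b.drop j.toNat) v = b.drop ((occ b v)[kb]'h.2 + 1).toNat := by
          unfold cutL
          rw [hkB, Option.getD_some, List.drop_drop]
          congr 1
          omega
        rw [hcut_a, hcut_b, hM rest]
        simp
    · refine ⟨[], i, j, ?_, hi, hj, ?_⟩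
      · rw [takeRun, dif_neg h]; simp
      · intro rest
        rcases Decidable.not_and_iff_not_or_not.1 h with h1 | h1
        · rw [M, if_neg (fun hc => (occ_exhausted hi hsa h1) hc.1)]; simp
        · rw [M, if_neg (fun hc => (occ_exhausted hj hsb h1) hc.2)]; simp

theorem mainLoop_spec (a b : List Int) (vs : List Int) (i j : Int) (out : List Int)
    (hi : 0 ≤ i) (hj : 0 ≤ j) :
    mainLoop (buildPos a) (buildPos b) vs i j out = out ++ M vs (a.drop i.toNat) (b.drop j.toNat) := by
  induction vs generalizing i j out with
  | nil => rw [mainLoop, M]; simp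
  | cons v rest ih =>
    rw [mainLoop]
    rw [buildPos_getD a v, buildPos_getD b v]
    have hska := skipLt_spec (occ a v) i 0 (Nat.zero_le _)
      (fun m hm h0 => absurd h0 (Nat.not_lt_zero m))
    have hskb := skipLt_spec (occ b v) j 0 (Nat.zero_le _)
      (fun m hm h0 => absurd h0 (Nat.not_lt_zero m))
    obtain ⟨run, i', j', heq, hi', hj', hM⟩ :=
      takeRun_spec ((occ a v).length) a b v i j (skipLt (occ a v) i 0) (skipLt (occ b v) j 0)
        out (by omega) hska hskb hi hj
    rw [heq]
    rw [ih i' j' (out ++ run) hi' hj']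
    rw [hM rest, List.append_assoc]

theorem f_alt_eq_G (a b : List Int) : f_alt a b = G a b := by
  unfold f_alt
  dsimp only
  rw [mainLoop_spec a b _ 0 0 [] le_rfl le_rfl]
  simp only [Int.toNat_zero, List.drop_zero, List.nil_append]
  apply M_eq_G
  · exact ((PySem.List.sorted_pairwise_rev _ (fun u => u)).and
      (((PySem.List.sorted_perm _ (fun u => u) true).nodup_iff).2
        (PySem.Set.nodup_inter _ _ (PySem.Set.nodup_ofList _)))).imp
      (fun h => lt_of_le_of_ne h.1 (Ne.symm h.2))
  · intro c hca hcb
    rw [PySem.List.mem_sorted, PySem.Set.mem_inter]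
    constructor
    · rw [PySem.Set.mem_ofList, buildPos_keys, PySem.Set.mem_ofList]
      exact hca
    · rw [buildPos_keys, PySem.Set.mem_ofList]
      exact hcb

-- ===== VERDICT =====
theorem f_spec : Claim_unchanged_f := by
  intro a b _ hnD
  rw [f_eq_G a b hnD, ← f_alt_eq_G a b]

theorem f_changed : Claim_changed_f := by
  unfold Claim_changed_f
  refine ⟨by decide, by decide, ?_, ?_, by decide⟩
  · show f [0] [0] = []
    rw [f]; decide
  · show f_alt [0] [0] = [0]
    rw [f_alt_eq_G]
    rw [G_of_some (t := 0) (by rw [mc_eq_some_iff]; norm_num)]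
    rw [show cutL [(0:Int)] 0 = [] by decide]
    rw [G_of_none (by rw [mc_eq_none_iff]; simp)]
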